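-- pv_equiv track=rewrite | github.com/tkell/statics | pielake.py | process
-- ===== SOURCE A (Python) =====
-- def process(loops, target, audio):
--     output = []
--     old_index = 0
--     for index, loop in enumerate(loops):
--         new_index = old_index + target[index]
--         slices = audio[old_index:new_index]
--         old_index = new_index
--         complete = slices * loop
--         output.extend(complete)
--     return output
-- ===== SOURCE B (Python) =====
-- def process(loops, target, audio):
--     n = len(loops)
--     end = sum(target[:n])
--     rev_chunks = []
--     for loop, t in zip(reversed(loops), reversed(target[:n])):
--         start = end - t
--         rev_chunks.append(audio[start:end] * loop)
--         end = start
--     out = []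
--     for chunk in reversed(rev_chunks):
--         out += chunk
--     return out
-- ===== Notes on version B (the rewrite author's own statement) =====
-- stated objective: alternative
-- what changed: B traverses the lists right-to-left: it computes the total consumed length once, walks zip(reversed(loops), reversed(target)) maintaining the slice END and subtracting each target to get the start, collects chunks in reverse, and concatenates them reversed - versus A's left-to-right running start accumulator.
-- outside the precondition, e.g. on process([1, 1], [3], [10, 20, 30]): A raises IndexError, B returns [10, 20, 30]
import Mathlib
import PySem

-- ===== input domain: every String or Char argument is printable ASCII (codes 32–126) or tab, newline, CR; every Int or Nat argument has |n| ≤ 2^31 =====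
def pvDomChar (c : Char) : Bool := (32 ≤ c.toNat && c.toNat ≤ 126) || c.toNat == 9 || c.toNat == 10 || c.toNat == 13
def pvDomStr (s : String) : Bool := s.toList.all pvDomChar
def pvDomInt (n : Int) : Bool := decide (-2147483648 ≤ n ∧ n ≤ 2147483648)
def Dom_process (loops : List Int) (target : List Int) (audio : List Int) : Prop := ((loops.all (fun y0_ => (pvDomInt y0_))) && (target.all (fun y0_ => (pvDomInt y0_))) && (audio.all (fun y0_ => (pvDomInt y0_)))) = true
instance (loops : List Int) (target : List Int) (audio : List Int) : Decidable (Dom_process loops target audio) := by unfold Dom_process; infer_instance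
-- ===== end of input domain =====

-- B walks the lists right-to-left from the precomputed total, maintaining the slice END
-- and collecting chunks in reverse, instead of A's left-to-right running start index
-- (alternative traversal order, same cost).

-- ===== PORT A =====
-- literal transliteration: fold over enumerate(loops) with state (output, old_index)
def process (loops : List Int) (target : List Int) (audio : List Int) : List Int :=
  ((PySem.List.enumerate loops 0).foldl
    (fun (st : List Int × Int) p =>
      let newIndex := st.2 + PySem.List.pyGetD target p.1 0
      let slices := PySem.List.slice audio (some st.2) (some newIndex)
      let complete := PySem.List.pyRepeat slices p.2
      (st.1 ++ complete, newIndex))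
    ([], 0)).1

-- ===== PORT B =====
-- literal transliteration of Source B: total, reversed zip walk carrying the end index,
-- reversed concatenation of the collected chunks
def process_alt (loops : List Int) (target : List Int) (audio : List Int) : List Int :=
  let n := loops.length
  let tr := PySem.List.slice target none (some (n : Int))   -- target[:n]
  let revChunks :=
    ((loops.reverse.zip tr.reverse).foldl
      (fun (st : List (List Int) × Int) p =>
        let start := st.2 - p.2
        (st.1 ++ [PySem.List.pyRepeat (PySem.List.slice audio (some start) (some st.2)) p.1], start))
      ([], tr.sum)).1
  revChunks.reverse.foldl (fun out chunk => out ++ chunk) []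

-- ===== PRECONDITION & SPEC =====
-- Pre_ excludes exactly the inputs where target is shorter than loops: there A raises
-- IndexError at target[index], while B's zip silently truncates (see cites).
def Pre_process (loops : List Int) (target : List Int) (audio : List Int) : Prop :=
  loops.length ≤ target.length

instance (loops : List Int) (target : List Int) (audio : List Int) : Decidable (Pre_process loops target audio) := by unfold Pre_process; infer_instance

def pvWitness_process : List Int × List Int × List Int := ([2, 0, 3], [1, 2, 1], [10, 20, 30, 40])

def Spec_process (loops : List Int) (target : List Int) (audio : List Int) (out : List Int) : Prop := out = process_alt loops target audio
instance (loops : List Int) (target : List Int) (audio : List Int) (out : List Int) : Decidable (Spec_process loops target audio out) := by unfold Spec_process; infer_instance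

-- ===== CLAIM (what is proved, stated in full; the proofs are below) =====
def Claim_equal_process : Prop := ∀ (loops : List Int) (target : List Int) (audio : List Int), Dom_process loops target audio → Pre_process loops target audio → Spec_process loops target audio (process loops target audio)

-- ===== LEMMAS AND PROOFS =====

-- the list of repeated slices both programs produce, one per (loop, target) pair
def specChunks (audio : List Int) : List Int → List Int → Int → List (List Int)
  | l :: ls, t :: ts, base =>
      PySem.List.pyRepeat (PySem.List.slice audio (some base) (some (base + t))) l
        :: specChunks audio ls ts (base + t)
  | _, _, _ => []

-- A's enumerate-fold from start index s and running position `base` appends the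
-- flattened chunks of the remaining pairs
theorem lemA (audio : List Int) (ls : List Int) : ∀ (s : Nat) (acc : List Int) (base : Int)
    (target : List Int), s + ls.length ≤ target.length →
    ((PySem.List.enumerate ls (s : Int)).foldl
      (fun (st : List Int × Int) p =>
        (st.1 ++ PySem.List.pyRepeat
          (PySem.List.slice audio (some st.2) (some (st.2 + PySem.List.pyGetD target p.1 0))) p.2,
         st.2 + PySem.List.pyGetD target p.1 0))
      (acc, base)).1
    = acc ++ (specChunks audio ls ((target.drop s).take ls.length) base).flatten := by
  induction ls with
  | nil => intro s acc base target _; simp [PySem.List.enumerate, specChunks]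
  | cons l ls ih =>
    intro s acc base target hlen
    have hs : s < target.length := by simp only [List.length_cons] at hlen; omega
    rw [PySem.List.enumerate_cons]
    have hdrop : target.drop s = target[s] :: target.drop (s + 1) :=
      List.drop_eq_getElem_cons hs
    have hget : PySem.List.pyGetD target (s : Int) 0 = target[s] := by
      rw [PySem.List.pyGetD_natCast]
      simp [List.getD_eq_getElem?_getD, List.getElem?_eq_getElem hs]
    have hcast : ((s : Int) + 1) = ((s + 1 : Nat) : Int) := by push_cast; ring
    simp only [List.foldl_cons, hget, hcast]
    rw [ih (s + 1) _ _ target (by simp only [List.length_cons] at hlen; omega)]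
    rw [List.length_cons, hdrop, List.take_succ_cons]
    simp only [specChunks, List.flatten_cons, List.append_assoc]

-- B's reversed-zip fold from end = base + ts.sum collects the chunks in reverse and
-- lands back on base
theorem lemB (audio : List Int) (ls : List Int) : ∀ (ts : List Int), ls.length = ts.length →
    ∀ (base : Int) (acc : List (List Int)),
    (ls.reverse.zip ts.reverse).foldl
      (fun (st : List (List Int) × Int) p =>
        (st.1 ++ [PySem.List.pyRepeat
            (PySem.List.slice audio (some (st.2 - p.2)) (some st.2)) p.1], st.2 - p.2))
      (acc, base + ts.sum)
    = (acc ++ (specChunks audio ls ts base).reverse, base) := by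
  induction ls with
  | nil =>
    intro ts hlen base acc
    have : ts = [] := List.eq_nil_of_length_eq_zero hlen.symm
    subst this; simp [specChunks]
  | cons l ls ih =>
    intro ts hlen base acc
    cases ts with
    | nil => simp at hlen
    | cons t ts =>
      have hl : ls.length = ts.length := by simpa using hlen
      simp only [List.reverse_cons]
      rw [List.zip_append (by simp [hl])]
      rw [List.foldl_append]
      have hsum : base + (t :: ts).sum = (base + t) + ts.sum := by simp [List.sum_cons]; ring
      rw [hsum, ih ts hl (base + t) acc]
      simp [specChunks, List.append_assoc]

-- concatenating a list of chunks left-to-right is flatten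
theorem foldl_append_flatten (L : List (List Int)) : ∀ (acc : List Int),
    L.foldl (fun out chunk => out ++ chunk) acc = acc ++ L.flatten := by
  induction L with
  | nil => intro acc; simp
  | cons c L ih => intro acc; simp [ih, List.append_assoc]

-- ===== VERDICT (by name: the statement is the Claim_ definition above) =====
theorem process_spec : Claim_equal_process := by
  intro loops target audio _ hpre
  unfold Spec_process process process_alt
  have htr : PySem.List.slice target none (some ((loops.length : Nat) : Int))
      = target.take loops.length := PySem.List.slice_to_natCast target loops.length
  have hpre' : loops.length ≤ target.length := hpre
  have hlen : loops.length = (target.take loops.length).length := by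
    simp [List.length_take]; omega
  simp only [htr]
  rw [show (target.take loops.length).sum = 0 + (target.take loops.length).sum by ring]
  rw [lemB audio loops (target.take loops.length) hlen 0 []]
  simp only [List.nil_append, List.reverse_reverse]
  rw [foldl_append_flatten]
  have := lemA audio loops 0 [] 0 target (by simpa using hpre)
  simpa using this
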